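-- pv_equiv track=rewrite | github.com/sue-zadeh/python-test | test 1.py | solution
-- ===== SOURCE A (Python) =====
-- def solution(memory, queries):
--
--     result = []
--     id = 1
--
--     for q in queries:
--
--         if q[0] == 0:
--             size = q[1]
--             found = -1
--
--             for i in range(0, len(memory), 8):
--
--                 ok = 1
--
--                 for j in range(size):
--
--                     if i + j >= len(memory):
--
--                         ok = 0
--
--                     elif memory[i + j] != 0:
--
--                         ok = 0
--
--                 if ok == 1 and found == -1:
--
--                     for j in range(size):
--
--                         memory[i + j] = id
--
--                     result = result + [i]
--
--                     id = id + 1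
--
--                     found = 1
--
--             if found == -1:
--
--                 result = result + [-1]
--
--         else:
--
--             target = q[1]
--
--             count = 0
--
--             for i in range(len(memory)):
--
--                 if memory[i] == target:
--
--                     memory[i] = 0
--
--                     count = count + 1
--
--             if count == 0:
--
--                 result = result + [-1]
--
--             else:
--
--                 result = result + [count]
--
--     return result
-- ===== SOURCE B (Python) =====
-- def solution(memory, queries):
--     # Return-value equivalent to A (both also zero/overwrite `memory` in place the same way).
--     # Different allocation strategy: precompute run[i] = length of the zero run starting at i
--     # (one backward pass), then each aligned start is a single comparison, with early exit on
--     # the first fit; the free branch uses count() and a comprehension instead of an index loop.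
--     result = []
--     next_id = 1
--     n = len(memory)
--     for q in queries:
--         if q[0] == 0:
--             size = q[1]
--             run = [0]
--             for v in reversed(memory):
--                 run.append(0 if v != 0 else run[-1] + 1)
--             run.reverse()
--             pos = -1
--             for i in range(0, n, 8):
--                 if run[i] >= size:
--                     pos = i
--                     break
--             if pos >= 0:
--                 for j in range(size):
--                     memory[pos + j] = next_id
--                 next_id += 1
--             result.append(pos)
--         else:
--             target = q[1]
--             count = memory.count(target)
--             memory[:] = [0 if v == target else v for v in memory]
--             result.append(count if count else -1)
--     return result
-- ===== Notes on version B (the rewrite author's own statement) =====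
-- stated objective: alternative
-- what changed: Allocation queries: instead of rescanning up to `size` cells at every aligned start (continuing even after a fit, guarded by a `found` flag), B makes one backward pass computing the zero-run length starting at each index, then tests each aligned start with a single comparison and exits on the first fit; the free branch becomes count()+a list comprehension instead of an index loop with an accumulator.
import Mathlib
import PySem

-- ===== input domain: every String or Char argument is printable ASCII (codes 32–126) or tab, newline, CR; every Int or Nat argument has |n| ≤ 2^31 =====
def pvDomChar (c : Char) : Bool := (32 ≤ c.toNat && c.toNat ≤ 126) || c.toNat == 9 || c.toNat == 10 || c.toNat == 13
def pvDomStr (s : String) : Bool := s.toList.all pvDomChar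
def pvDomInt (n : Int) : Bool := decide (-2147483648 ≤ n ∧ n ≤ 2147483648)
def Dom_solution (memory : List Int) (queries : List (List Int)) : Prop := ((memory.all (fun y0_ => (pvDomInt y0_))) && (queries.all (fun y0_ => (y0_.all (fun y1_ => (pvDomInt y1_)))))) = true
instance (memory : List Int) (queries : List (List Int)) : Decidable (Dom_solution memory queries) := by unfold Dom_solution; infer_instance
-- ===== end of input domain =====

-- B replaces A's per-start rescans by one backward pass computing zero-run lengths (one comparison
-- per aligned start, early exit) and the free loop by count+map; equivalence is about the RETURN
-- value (both Pythons also mutate `memory` in place the same way).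

-- ===== PORT A =====
-- inner `for j in range(size)` computing `ok`
def okLoop (m : List Int) (size i : Int) : Int :=
  (PySem.List.pyRange 0 size 1).foldl
    (fun ok j =>
      if i + j ≥ (m.length : Int) then 0
      else if PySem.List.pyGetD m (i + j) 0 ≠ 0 then 0
      else ok) 1

-- `for j in range(size): memory[i+j] = id`
def writeLoop (m : List Int) (size i d : Int) : List Int :=
  (PySem.List.pyRange 0 size 1).foldl (fun mm j => PySem.List.pySetD mm (i + j) d) m

-- body of `for i in range(0, len(memory), 8)`; state = (memory, result, id, found)
def scanStep (size : Int) (st : List Int × List Int × Int × Int) (i : Int) :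
    List Int × List Int × Int × Int :=
  let ok := okLoop st.1 size i
  if ok == 1 && st.2.2.2 == -1 then
    (writeLoop st.1 size i st.2.2.1, st.2.1 ++ [i], st.2.2.1 + 1, 1)
  else st

-- body of `for i in range(len(memory))` in the free branch; state = (memory, count)
def freeStep (target : Int) (st : List Int × Int) (i : Int) : List Int × Int :=
  if PySem.List.pyGetD st.1 i 0 == target then (PySem.List.pySetD st.1 i 0, st.2 + 1) else st

-- one query of A's main loop; state = (memory, result, id)
def queryStepA (st : List Int × List Int × Int) (q : List Int) : List Int × List Int × Int :=
  if PySem.List.pyGetD q 0 0 == 0 then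
    let size := PySem.List.pyGetD q 1 0
    let scan := (PySem.List.pyRange 0 (st.1.length : Int) 8).foldl (scanStep size)
                  (st.1, st.2.1, st.2.2, -1)
    if scan.2.2.2 == -1 then (scan.1, scan.2.1 ++ [-1], scan.2.2.1)
    else (scan.1, scan.2.1, scan.2.2.1)
  else
    let target := PySem.List.pyGetD q 1 0
    let fr := (PySem.List.pyRange 0 (st.1.length : Int) 1).foldl (freeStep target) (st.1, 0)
    (fr.1, st.2.1 ++ [if fr.2 == 0 then -1 else fr.2], st.2.2)

def solution (memory : List Int) (queries : List (List Int)) : List Int :=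
  (queries.foldl queryStepA (memory, ([] : List Int), (1 : Int))).2.1

-- ===== PORT B =====
-- `run = [0]; for v in reversed(memory): run.append(0 if v != 0 else run[-1] + 1); run.reverse()`
def runTable (memory : List Int) : List Int :=
  (memory.reverse.foldl
    (fun t v => t ++ [if v ≠ 0 then (0 : Int) else (PySem.List.pyGet? t (-1)).getD 0 + 1])
    [0]).reverse

-- `for j in range(size): memory[pos+j] = next_id`
def writeLoopB (m : List Int) (size i d : Int) : List Int :=
  (PySem.List.pyRange 0 size 1).foldl (fun mm j => PySem.List.pySetD mm (i + j) d) m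

-- one query of B's main loop; state = (memory, result, next_id)
def queryStepB (st : List Int × List Int × Int) (q : List Int) : List Int × List Int × Int :=
  if PySem.List.pyGetD q 0 0 == 0 then
    let size := PySem.List.pyGetD q 1 0
    let run := runTable st.1
    let pos := ((PySem.List.pyRange 0 (st.1.length : Int) 8).find?
        (fun i => decide (size ≤ PySem.List.pyGetD run i 0))).getD (-1)
    if pos ≥ 0 then (writeLoopB st.1 size pos st.2.2, st.2.1 ++ [pos], st.2.2 + 1)
    else (st.1, st.2.1 ++ [pos], st.2.2)
  else
    let target := PySem.List.pyGetD q 1 0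
    let count : Int := (PySem.List.count st.1 target : Int)
    (st.1.map (fun v => if v == target then 0 else v),
     st.2.1 ++ [if count == 0 then -1 else count], st.2.2)

def solution_alt (memory : List Int) (queries : List (List Int)) : List Int :=
  (queries.foldl queryStepB (memory, ([] : List Int), (1 : Int))).2.1

-- ===== PRECONDITION & SPEC =====
-- Pre excludes exactly the inputs where Python A raises IndexError: a query list entry with
-- fewer than 2 elements (A reads q[0] and q[1]).
def Pre_solution (memory : List Int) (queries : List (List Int)) : Prop :=
  ∀ q ∈ queries, 2 ≤ q.length
instance (memory : List Int) (queries : List (List Int)) : Decidable (Pre_solution memory queries) := by unfold Pre_solution; infer_instance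

def pvWitness_solution : List Int × List (List Int) := ([0, 0, 3], [[0, 2], [1, 3]])

def Spec_solution (memory : List Int) (queries : List (List Int)) (out : List Int) : Prop := out = solution_alt memory queries
instance (memory : List Int) (queries : List (List Int)) (out : List Int) : Decidable (Spec_solution memory queries out) := by unfold Spec_solution; infer_instance

-- ===== CLAIM (what is proved, stated in full; the proofs are below) =====
def Claim_equal_solution : Prop := ∀ (memory : List Int) (queries : List (List Int)), Dom_solution memory queries → Pre_solution memory queries → Spec_solution memory queries (solution memory queries)

-- ===== LEMMAS AND PROOFS =====

-- proof-side view of B's run table: structural right-to-left recursion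
def runR : List Int → List Int
  | [] => [0]
  | v :: rest => (if v ≠ 0 then 0 else (runR rest).headD 0 + 1) :: runR rest

lemma runR_ne_nil (l : List Int) : runR l ≠ [] := by
  cases l <;> simp [runR]

lemma runTable_fold (l : List Int) :
    l.reverse.foldl
      (fun t v => t ++ [if v ≠ 0 then (0 : Int) else (PySem.List.pyGet? t (-1)).getD 0 + 1])
      [0] = (runR l).reverse := by
  induction l with
  | nil => simp [runR]
  | cons v rest ih =>
    simp only [List.reverse_cons, List.foldl_append, List.foldl_cons, List.foldl_nil, ih]
    simp only [PySem.List.pyGet?_neg_one, List.getLast?_reverse, runR, List.reverse_cons]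
    rcases hr : runR rest with _ | ⟨h0, t0⟩
    · exact absurd hr (runR_ne_nil rest)
    · simp

lemma runTable_eq (l : List Int) : runTable l = runR l := by
  unfold runTable
  rw [runTable_fold, List.reverse_reverse]

lemma runR_length (l : List Int) : (runR l).length = l.length + 1 := by
  induction l with
  | nil => simp [runR]
  | cons v rest ih => simp [runR, ih]

lemma runR_headD_nonneg (l : List Int) : 0 ≤ (runR l).headD 0 := by
  induction l with
  | nil => simp [runR]
  | cons v rest ih =>
    by_cases h : v ≠ 0 <;> simp only [runR, h, if_neg, List.headD_cons] <;> omega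

lemma runR_headD_le (l : List Int) : (runR l).headD 0 ≤ (l.length : Int) := by
  induction l with
  | nil => simp [runR]
  | cons v rest ih =>
    by_cases h : v ≠ 0 <;> simp only [runR, h, if_pos, if_neg, List.headD_cons, List.length_cons] <;>
      push_cast <;> omega

lemma runR_ge_iff (l : List Int) (s : Nat) (hs : s ≤ l.length) :
    ((s : Int) ≤ (runR l).headD 0 ↔ ∀ j, j < s → l.getD j 1 = 0) := by
  induction l generalizing s with
  | nil =>
    have : s = 0 := Nat.le_zero.mp hs
    subst this
    simpa using runR_headD_nonneg []
  | cons v rest ih =>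
    cases s with
    | zero => simpa using runR_headD_nonneg (v :: rest)
    | succ k =>
      have hk : k ≤ rest.length := by simpa using hs
      by_cases h : v ≠ 0
      · simp only [runR, h, if_pos, List.headD_cons]
        constructor
        · intro hle; omega
        · intro hz
          exact absurd (by simpa using hz 0 (Nat.succ_pos k)) h
      · push_neg at h
        simp only [runR, h, ne_eq, not_true_eq_false, if_neg, not_false_iff, List.headD_cons]
        rw [show (((k + 1 : Nat)) : Int) ≤ (runR rest).headD 0 + 1 ↔ ((k : Nat) : Int) ≤ (runR rest).headD 0 from by push_cast; omega]
        rw [ih k hk]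
        constructor
        · intro hz j hj
          cases j with
          | zero => simpa using h
          | succ j' => simpa using hz j' (by omega)
        · intro hz j hj
          simpa using hz (j + 1) (by omega)

lemma runR_getD (l : List Int) (t : Nat) (ht : t ≤ l.length) :
    (runR l).getD t 0 = (runR (l.drop t)).headD 0 := by
  induction l generalizing t with
  | nil =>
    have : t = 0 := Nat.le_zero.mp ht
    subst this
    simp [runR]
  | cons v rest ih =>
    cases t with
    | zero =>
      rcases hr : runR (v :: rest) with _ | ⟨h0, t0⟩
      · exact absurd hr (runR_ne_nil _)
      · simp [hr]
    | succ k =>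
      have hk : k ≤ rest.length := by simpa using ht
      simp only [runR, List.getD_cons_succ, List.drop_succ_cons]
      exact ih k hk

lemma foldl_flag (p : Int → Bool) (L : List Int) (s : Int) :
    L.foldl (fun ok j => if p j then ok else 0) s = if ∀ j ∈ L, p j = true then s else 0 := by
  induction L generalizing s with
  | nil => simp
  | cons a L ih =>
    by_cases hpa : p a = true
    · simp [hpa, ih]
    · simp [hpa, ih]

lemma okLoop_eq (m : List Int) (size i : Int) :
    okLoop m size i =
      if ∀ j ∈ PySem.List.pyRange 0 size 1,
          (decide (i + j < (m.length : Int) ∧ PySem.List.pyGetD m (i + j) 0 = 0)) = true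
      then 1 else 0 := by
  unfold okLoop
  have hbody : (fun (ok j : Int) =>
      if i + j ≥ (m.length : Int) then (0 : Int)
      else if PySem.List.pyGetD m (i + j) 0 ≠ 0 then 0
      else ok)
      = (fun (ok j : Int) =>
        if (decide (i + j < (m.length : Int) ∧ PySem.List.pyGetD m (i + j) 0 = 0)) = true
        then ok else 0) := by
    funext ok j
    by_cases h1 : i + j ≥ (m.length : Int) <;>
      by_cases h2 : PySem.List.pyGetD m (i + j) 0 = 0 <;>
        simp [h1, h2] <;> omega
  rw [hbody, foldl_flag]

lemma pyGetD_drop (m : List Int) (a j : Nat) (h : a + j < m.length) :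
    PySem.List.pyGetD m ((a + j : Nat) : Int) 0 = (m.drop a).getD j 1 := by
  have hj : j < (m.drop a).length := by
    rw [List.length_drop]; omega
  rw [PySem.List.pyGetD_natCast, List.getD_eq_getElem m 0 h, List.getD_eq_getElem _ 1 hj,
    List.getElem_drop]

lemma ok_iff_run (m : List Int) (size i : Int) (h0 : 0 ≤ i) (hn : i < (m.length : Int)) :
    (okLoop m size i = 1) ↔ (size ≤ PySem.List.pyGetD (runTable m) i 0) := by
  have hai : i.toNat < m.length := by omega
  have hlenR : i < ((runR m).length : Int) := by rw [runR_length]; push_cast; omega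
  rw [runTable_eq, PySem.List.pyGetD_eq_getElem (runR m) 0 h0 hlenR,
    show (runR m)[i.toNat]'(by rw [runR_length]; omega) = (runR m).getD i.toNat 0 from
      (List.getD_eq_getElem _ _ (by rw [runR_length]; omega)).symm,
    runR_getD m i.toNat (le_of_lt hai), okLoop_eq]
  have hlen : (m.drop i.toNat).length = m.length - i.toNat := List.length_drop
  have hsplit : ∀ (C : Prop) [Decidable C], ((if C then (1 : Int) else 0) = 1) ↔ C := by
    intro C _
    split_ifs with h <;> simp [h]
  rw [hsplit]
  by_cases hsz : size ≤ 0
  · constructor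
    · intro _
      exact le_trans hsz (runR_headD_nonneg _)
    · intro _ j hj
      rw [PySem.List.pyRange_one_eq_nil hsz] at hj
      simp at hj
  · push_cast at *
    have hszpos : 0 < size := by omega
    have hs : ((size.toNat : Nat) : Int) = size := Int.toNat_of_nonneg (by omega)
    constructor
    · intro hC
      have hC' : ∀ j : Int, 0 ≤ j → j < size →
          i + j < (m.length : Int) ∧ PySem.List.pyGetD m (i + j) 0 = 0 := by
        intro j hj0 hjs
        simpa using hC j (PySem.List.mem_pyRange_one.mpr ⟨hj0, hjs⟩)
      have hend : i + size ≤ (m.length : Int) := by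
        have := (hC' (size - 1) (by omega) (by omega)).1
        omega
      have hsl : size.toNat ≤ (m.drop i.toNat).length := by omega
      rw [← hs, runR_ge_iff _ _ hsl]
      intro j hj
      have hj' := hC' (j : Int) (by positivity) (by omega)
      have hidx : i + (j : Int) = ((i.toNat + j : Nat) : Int) := by push_cast; omega
      rw [hidx, pyGetD_drop m i.toNat j (by omega)] at hj'
      exact hj'.2
    · intro hr
      have hle := runR_headD_le (m.drop i.toNat)
      have hsl : size.toNat ≤ (m.drop i.toNat).length := by omega
      have hzeros := (runR_ge_iff _ _ hsl).mp (by rw [hs]; exact hr)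
      intro j hjmem
      obtain ⟨hj0, hjs⟩ := PySem.List.mem_pyRange_one.mp hjmem
      have hlt : i + j < (m.length : Int) := by omega
      rw [decide_eq_true_eq]
      refine ⟨hlt, ?_⟩
      have hidx : i + j = ((i.toNat + j.toNat : Nat) : Int) := by push_cast; omega
      rw [hidx, pyGetD_drop m i.toNat j.toNat (by omega)]
      exact hzeros j.toNat (by omega)

lemma findq_congr {p q : Int → Bool} (L : List Int) (h : ∀ x ∈ L, p x = q x) :
    L.find? p = L.find? q := by
  induction L with
  | nil => rfl
  | cons a L ih =>
    simp only [List.find?]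
    rw [h a (List.mem_cons_self)]
    cases hq : q a with
    | true => rfl
    | false => exact ih (fun x hx => h x (List.mem_cons_of_mem a hx))

lemma scan_found (size : Int) (L : List Int) (m r : List Int) (d : Int) :
    L.foldl (scanStep size) (m, r, d, 1) = (m, r, d, 1) := by
  induction L with
  | nil => rfl
  | cons a L ih =>
    have hstep : scanStep size (m, r, d, 1) a = (m, r, d, 1) := by
      simp [scanStep]
    simp only [List.foldl_cons, hstep, ih]

lemma scan_none (size : Int) (L : List Int) (m r : List Int) (d : Int)
    (h : ∀ i ∈ L, ¬(okLoop m size i == 1) = true) :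
    L.foldl (scanStep size) (m, r, d, -1) = (m, r, d, -1) := by
  induction L with
  | nil => rfl
  | cons a L ih =>
    have ha := h a (List.mem_cons_self)
    have hstep : scanStep size (m, r, d, -1) a = (m, r, d, -1) := by
      simp only [scanStep]
      rw [if_neg]
      simp only [Bool.and_eq_true, not_and]
      intro hok
      exact absurd hok ha
    simp only [List.foldl_cons, hstep]
    exact ih (fun i hi => h i (List.mem_cons_of_mem a hi))

lemma scan_some (size : Int) (L : List Int) (m r : List Int) (d i0 : Int)
    (h : L.find? (fun i => okLoop m size i == 1) = some i0) :
    L.foldl (scanStep size) (m, r, d, -1) = (writeLoop m size i0 d, r ++ [i0], d + 1, 1) := by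
  induction L with
  | nil => simp at h
  | cons a L ih =>
    by_cases ha : (okLoop m size a == 1) = true
    · rw [show ((a :: L).find? (fun i => okLoop m size i == 1)) = some a from by
        simp [List.find?, ha]] at h
      injection h with h; subst h
      have hstep : scanStep size (m, r, d, -1) a
          = (writeLoop m size a d, r ++ [a], d + 1, 1) := by
        simp [scanStep, ha]
      simp only [List.foldl_cons, hstep, scan_found]
    · rw [show ((a :: L).find? (fun i => okLoop m size i == 1))
          = L.find? (fun i => okLoop m size i == 1) from by
        have ha' : (okLoop m size a == 1) = false := Bool.not_eq_true _ |>.mp ha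
        simp [List.find?, ha']] at h
      have hstep : scanStep size (m, r, d, -1) a = (m, r, d, -1) := by
        simp only [scanStep]
        rw [if_neg]
        simp only [Bool.and_eq_true, not_and]
        intro hok
        exact absurd hok ha
      simp only [List.foldl_cons, hstep]
      exact ih h

lemma free_loop (target : Int) (suf : List Int) : ∀ (pre : List Int) (c : Int),
    (PySem.List.pyRange (pre.length : Int) ((pre.length : Int) + (suf.length : Int)) 1).foldl
        (freeStep target) (pre ++ suf, c)
      = (pre ++ suf.map (fun v => if v == target then 0 else v),
         c + (PySem.List.count suf target : Int)) := by
  induction suf with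
  | nil =>
    intro pre c
    rw [show ((pre.length : Int) + (([] : List Int).length : Int)) = (pre.length : Int) from by simp]
    rw [PySem.List.pyRange_one_eq_nil le_rfl]
    simp [PySem.List.count]
  | cons v rest ih =>
    intro pre c
    have hcons : PySem.List.pyRange (pre.length : Int)
        ((pre.length : Int) + (((v :: rest).length : Nat) : Int)) 1
        = (pre.length : Int) :: PySem.List.pyRange ((pre.length : Int) + 1)
            ((pre.length : Int) + (((v :: rest).length : Nat) : Int)) 1 := by
      apply PySem.List.pyRange_one_cons
      simp only [List.length_cons]
      push_cast
      omega
    rw [hcons]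
    simp only [List.foldl_cons]
    have hget : PySem.List.pyGetD (pre ++ v :: rest) (pre.length : Int) 0 = v := by
      rw [PySem.List.pyGetD_natCast]
      rw [List.getD_eq_getElem _ _ (by simp)]
      simp
    by_cases hv : (v == target) = true
    · have hstep : freeStep target (pre ++ v :: rest, c) (pre.length : Int)
          = (pre ++ 0 :: rest, c + 1) := by
        simp only [freeStep, hget, hv, if_pos]
        rw [show PySem.List.pySetD (pre ++ v :: rest) (pre.length : Int) 0
              = (pre ++ v :: rest).set pre.length 0 from PySem.List.pySetD_natCast _ _ _]
        simp
      rw [hstep]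
      have hre : pre ++ 0 :: rest = (pre ++ [0]) ++ rest := by simp
      have hlen1 : (pre.length : Int) + 1 = (((pre ++ [0]).length : Nat) : Int) := by
        simp
      have hlen2 : (pre.length : Int) + (((v :: rest).length : Nat) : Int)
          = (((pre ++ [0]).length : Nat) : Int) + ((rest.length : Nat) : Int) := by
        simp; omega
      rw [hre, hlen1, hlen2, ih (pre ++ [0]) (c + 1)]
      have hb : v = target := by simpa using hv
      simp [PySem.List.count, hb]
      omega
    · have hstep : freeStep target (pre ++ v :: rest, c) (pre.length : Int)
          = (pre ++ v :: rest, c) := by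
        simp [freeStep, hget, hv]
      rw [hstep]
      have hre : pre ++ v :: rest = (pre ++ [v]) ++ rest := by simp
      have hlen1 : (pre.length : Int) + 1 = (((pre ++ [v]).length : Nat) : Int) := by
        simp
      have hlen2 : (pre.length : Int) + (((v :: rest).length : Nat) : Int)
          = (((pre ++ [v]).length : Nat) : Int) + ((rest.length : Nat) : Int) := by
        simp; omega
      rw [hre, hlen1, hlen2, ih (pre ++ [v]) c]
      have hb : ¬ v = target := by simpa using hv
      simp [PySem.List.count, hb]

lemma writeLoopB_eq (m : List Int) (size i d : Int) :
    writeLoopB m size i d = writeLoop m size i d := rfl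

lemma queryStep_eq (st : List Int × List Int × Int) (q : List Int) :
    queryStepA st q = queryStepB st q := by
  obtain ⟨mem, res, id⟩ := st
  by_cases hq : (PySem.List.pyGetD q 0 0 == 0) = true
  · simp only [queryStepA, queryStepB, hq, if_pos]
    have hmemS : ∀ i ∈ PySem.List.pyRange 0 ((mem.length : Nat) : Int) 8,
        0 ≤ i ∧ i < (mem.length : Int) := by
      intro i hi
      have h8 : (0 : Int) < 8 := by norm_num
      have := (PySem.List.mem_pyRange_iff_of_pos h8 i).mp hi
      exact ⟨this.1, this.2.1⟩
    have hpred : ∀ i ∈ PySem.List.pyRange 0 ((mem.length : Nat) : Int) 8,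
        ((fun i => okLoop mem (PySem.List.pyGetD q 1 0) i == 1) i)
          = ((fun i => decide (PySem.List.pyGetD q 1 0
              ≤ PySem.List.pyGetD (runTable mem) i 0)) i) := by
      intro i hi
      obtain ⟨h0, hn⟩ := hmemS i hi
      rw [Bool.eq_iff_iff]
      simp only [beq_iff_eq, decide_eq_true_eq]
      exact ok_iff_run mem (PySem.List.pyGetD q 1 0) i h0 hn
    have hfind := findq_congr _ hpred
    cases hf : (PySem.List.pyRange 0 ((mem.length : Nat) : Int) 8).find?
        (fun i => okLoop mem (PySem.List.pyGetD q 1 0) i == 1) with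
    | none =>
      rw [scan_none _ _ _ _ _ (by
        intro i hi
        have := List.find?_eq_none.mp hf i hi
        simpa using this)]
      rw [hf] at hfind
      rw [← hfind]
      norm_num
    | some i0 =>
      rw [scan_some _ _ _ _ _ i0 hf]
      rw [hf] at hfind
      rw [← hfind]
      have hpos : 0 ≤ i0 := (hmemS i0 (List.mem_of_find?_eq_some hf)).1
      simp only [Option.getD_some]
      rw [if_neg (by norm_num), if_pos (by omega : i0 ≥ 0), writeLoopB_eq]
  · simp only [queryStepA, queryStepB, hq, if_neg, Bool.not_eq_true]
    have h := free_loop (PySem.List.pyGetD q 1 0) mem [] 0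
    simp only [List.length_nil, Nat.cast_zero, List.nil_append, zero_add] at h
    rw [h]

lemma steps_eq (qs : List (List Int)) (st : List Int × List Int × Int) :
    qs.foldl queryStepA st = qs.foldl queryStepB st := by
  induction qs generalizing st with
  | nil => rfl
  | cons q qs ih => simp only [List.foldl_cons, queryStep_eq, ih]

-- ===== VERDICT (by name: the statement is the Claim_ definition above) =====
theorem solution_spec : Claim_equal_solution := by
  intro memory queries _ _
  unfold Spec_solution solution solution_alt
  rw [steps_eq]
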